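-- pv_equiv track=rewrite | github.com/manelbertran-arch/CLONNECT | backend/scripts/finetuning/09_dataset_quality_gate.py | check_role_alternation
-- ===== SOURCE A (Python) =====
-- def check_role_alternation(msgs: list) -> bool:
--     """Check user/assistant alternate (system allowed at start only)."""
--     non_sys = [m for m in msgs if m.get("role") != "system"]
--     if not non_sys:
--         return False
--     expected = "user"
--     for m in non_sys:
--         role = m.get("role")
--         if role != expected:
--             return False
--         expected = "assistant" if expected == "user" else "user"
--     return True
-- ===== SOURCE B (Python) =====
-- def check_role_alternation(msgs: list) -> bool:
--     """Check user/assistant alternate (system allowed at start only)."""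
--     roles = [m.get("role") for m in msgs if m.get("role") != "system"]
--     if not roles or roles[0] != "user":
--         return False
--     legal = (("user", "assistant"), ("assistant", "user"))
--     return all(pair in legal for pair in zip(roles, roles[1:]))
-- ===== Notes on version B (the rewrite author's own statement) =====
-- stated objective: alternative
-- what changed: Replaces A's stateful running-toggle loop with a local pairwise check: the first non-system role must be 'user' and every adjacent pair of non-system roles must be one of the two legal transitions (user,assistant)/(assistant,user).
import Mathlib
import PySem

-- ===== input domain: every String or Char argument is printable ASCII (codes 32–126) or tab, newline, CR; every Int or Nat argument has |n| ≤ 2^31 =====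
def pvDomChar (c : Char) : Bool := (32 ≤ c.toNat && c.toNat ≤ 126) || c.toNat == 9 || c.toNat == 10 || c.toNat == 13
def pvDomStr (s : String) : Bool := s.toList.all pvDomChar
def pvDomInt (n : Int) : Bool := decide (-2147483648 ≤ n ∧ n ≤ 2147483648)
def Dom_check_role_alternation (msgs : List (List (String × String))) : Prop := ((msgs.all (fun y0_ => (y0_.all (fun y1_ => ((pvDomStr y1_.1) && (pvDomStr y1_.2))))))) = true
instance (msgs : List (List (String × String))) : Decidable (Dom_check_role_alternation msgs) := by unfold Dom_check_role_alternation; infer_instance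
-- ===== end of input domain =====

-- B replaces A's stateful running-toggle loop with a local pairwise check
-- (first role 'user' + every adjacent pair a legal transition); objective: alternative, same cost.

-- ===== PORT A =====
-- m.get("role"): dict lookup returning None when absent
def roleGet (m : List (String × String)) : Option String := PySem.Dict.get? (PySem.Dict.mk m) "role"

-- A's loop: early-return False on mismatch, toggle `expected` each step
def goA : List (List (String × String)) → String → Bool
  | [], _ => true
  | m :: rest, expected =>
      if roleGet m != some expected then false
      else goA rest (if expected == "user" then "assistant" else "user")

def check_role_alternation (msgs : List (List (String × String))) : Bool :=
  let non_sys := msgs.filter (fun m => roleGet m != some "system")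
  if non_sys.isEmpty then false
  else goA non_sys "user"

-- ===== PORT B =====
def pairOk (p : Option String × Option String) : Bool :=
  p == (some "user", some "assistant") || p == (some "assistant", some "user")

def check_role_alternation_alt (msgs : List (List (String × String))) : Bool :=
  let roles := (msgs.filter (fun m => roleGet m != some "system")).map roleGet
  match roles with
  | [] => false
  | r0 :: rest => (r0 == some "user") && (roles.zip rest).all pairOk

-- ===== PRECONDITION & SPEC =====
def Spec_check_role_alternation (msgs : List (List (String × String))) (out : Bool) : Prop := out = check_role_alternation_alt msgs
instance (msgs : List (List (String × String))) (out : Bool) : Decidable (Spec_check_role_alternation msgs out) := by unfold Spec_check_role_alternation; infer_instance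

-- ===== CLAIM (what is proved, stated in full; the proofs are below) =====
def Claim_equal_check_role_alternation : Prop := ∀ (msgs : List (List (String × String))), Dom_check_role_alternation msgs → Spec_check_role_alternation msgs (check_role_alternation msgs)

-- ===== LEMMAS AND PROOFS =====

-- goA viewed on the role list only
def goR : List (Option String) → String → Bool
  | [], _ => true
  | r :: rest, expected =>
      if r != some expected then false
      else goR rest (if expected == "user" then "assistant" else "user")

theorem goA_eq_goR (xs : List (List (String × String))) :
    ∀ e, goA xs e = goR (xs.map roleGet) e := by
  induction xs with
  | nil => intro e; simp [goA, goR]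
  | cons m rest ih => intro e; simp [goA, goR, ih]

theorem goR_cons (r : Option String) (rest : List (Option String)) (e : String) :
    goR (r :: rest) e =
      if r != some e then false
      else goR rest (if e == "user" then "assistant" else "user") := rfl

-- the toggle loop equals the pairwise check, for either legal start role
theorem goR_eq_pairwise (rs : List (Option String)) :
    ∀ e, e = "user" ∨ e = "assistant" →
      goR rs e = match rs with
        | [] => true
        | r0 :: rest => (r0 == some e) && (rs.zip rest).all pairOk := by
  induction rs with
  | nil => intro e _; simp [goR]
  | cons r0 rest ih =>
      intro e he
      by_cases h0 : r0 = some e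
      · cases rest with
        | nil => simp [goR, h0]
        | cons r1 rest' =>
            have he' : (if e == "user" then "assistant" else "user") = "user" ∨
                (if e == "user" then "assistant" else "user") = "assistant" := by
              rcases he with h | h <;> simp [h]
            have hstep := ih (if e == "user" then "assistant" else "user") he'
            rw [goR_cons, hstep]
            rcases he with h | h <;>
              · subst h
                by_cases h1 : r1 = some "assistant" <;> by_cases h1' : r1 = some "user" <;>
                  simp_all [pairOk, List.all_cons, beq_eq_decide, Prod.ext_iff]
      · simp [goR, h0, pairOk, List.zip]

-- ===== VERDICT (by name: the statement is the Claim_ definition above) =====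
theorem check_role_alternation_spec : Claim_equal_check_role_alternation := by
  intro msgs _
  unfold Spec_check_role_alternation check_role_alternation check_role_alternation_alt
  cases hx : (msgs.filter (fun m => roleGet m != some "system")).map roleGet with
  | nil =>
      have h0 : msgs.filter (fun m => roleGet m != some "system") = [] :=
        List.map_eq_nil_iff.mp hx
      simp [h0]
  | cons r0 rest =>
      have hne : (msgs.filter (fun m => roleGet m != some "system")).isEmpty = false := by
        rcases h : msgs.filter (fun m => roleGet m != some "system") with _ | _
        · rw [h] at hx; simp at hx
        · simp
      simp only [hne, hx, goA_eq_goR, Bool.false_eq_true, if_false]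
      exact goR_eq_pairwise (r0 :: rest) "user" (Or.inl rfl)
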